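-- pv_equiv track=rewrite | github.com/immo/pyTOM | df/df_concept.py | splitConceptString
-- ===== SOURCE A (Python) =====
-- def splitConceptString(s):
--     """This functions splits the concept string s into its parts"""
--     # first, we split at each : the whole string
--     parts = s.split(':')
--     # next we need to collate the genom information parts
--     leftHand = ''
--     rightHand = ''
--     leftFoot = ''
--     rightFoot = ''
--     leftHandI = ''
--     rightHandI = ''
--     leftFootI = ''
--     rightFootI = ''
--     leftHandMeta = ''
--     rightHandMeta = ''
--     leftFootMeta = ''
--     rightFootMeta = ''
--     controlData = ''
--     for pt in parts:
--         if len(pt)>=1: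
--             if pt[0] == 'l':
--                 leftHand += pt[1:]
--             elif pt[0] == 'L':
--                 leftHandMeta += pt[1:]
--             elif pt[0] == 'r':
--                 rightHand += pt[1:]
--             elif pt[0] == 'R':
--                 rightHandMeta += pt[1:]
--             elif pt[0] == 'a':
--                 leftFoot += pt[1:]
--             elif pt[0] == 'A':
--                 leftFootMeta += pt[1:]
--             elif pt[0] == 'b':
--                 rightFoot += pt[1:]
--             elif pt[0] == 'B':
--                 rightFootMeta += pt[1:]
--             elif pt[0] == 'C':
--                 controlData += pt[1:]
--             elif pt[0] == "'":
--                 if len(pt)>=2: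
--                     if pt[1] == 'L':
--                         leftHandI += pt[2:]
--                     elif pt[1] == 'R':
--                         rightHandI += pt[2:]
--                     elif pt[1] == 'A':
--                         leftFootI += pt[2:]
--                     elif pt[1] == 'B':
--                         rightFootI += pt[2:]
--                     else:
--                         controlData += pt
--                 else:
--                     controlData += pt
--             else:
--                 controlData += pt
--     return {'l':leftHand, 'L': leftHandMeta, 'r':rightHand, 'R':rightHandMeta,\
--            'a':leftFoot, 'A':leftFootMeta, 'b':rightFoot, 'B':rightFootMeta,\
--            "'L": leftHandI, "'R": rightHandI, "'A":leftFootI, "'B":rightFootI,\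
--            'C': controlData}
-- ===== SOURCE B (Python) =====
-- def splitConceptString(s):
--     """Split the concept string s into its categorized parts."""
--     SINGLE = set("lLrRaAbBC")
--     SUB = set("LRAB")
--
--     def classify(pt):
--         if pt[0] in SINGLE:
--             return pt[0], pt[1:]
--         if pt[0] == "'" and len(pt) >= 2 and pt[1] in SUB:
--             return pt[:2], pt[2:]
--         return 'C', pt
--
--     tagged = [classify(pt) for pt in s.split(':') if pt]
--     return {k: ''.join(v for t, v in tagged if t == k)
--             for k in ('l', 'L', 'r', 'R', 'a', 'A', 'b', 'B',
--                       "'L", "'R", "'A", "'B", 'C')}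
-- ===== Notes on version B (the rewrite author's own statement) =====
-- stated objective: idiomatic
-- what changed: Replaces the 13 mutable accumulators and the long if/elif cascade by a two-phase pipeline: each non-empty part is first mapped to a (category, payload) tag, then the result dict is built with a comprehension that joins the payloads per category.
import Mathlib
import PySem

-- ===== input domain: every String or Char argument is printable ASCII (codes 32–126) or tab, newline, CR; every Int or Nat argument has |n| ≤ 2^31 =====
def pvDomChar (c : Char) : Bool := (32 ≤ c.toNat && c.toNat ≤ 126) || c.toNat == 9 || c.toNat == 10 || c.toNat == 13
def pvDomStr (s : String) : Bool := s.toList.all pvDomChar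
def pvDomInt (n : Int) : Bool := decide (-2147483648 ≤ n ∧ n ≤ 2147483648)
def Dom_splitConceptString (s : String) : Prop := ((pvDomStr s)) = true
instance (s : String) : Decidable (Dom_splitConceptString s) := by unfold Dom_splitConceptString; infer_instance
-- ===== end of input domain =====

-- B replaces A's 13 mutable accumulators and if/elif cascade by a two-phase
-- pipeline (tag each part with its category, then join the payloads per key);
-- objective: a more idiomatic decomposition, same O(n) cost.

-- ===== PORT A =====
-- A's for-loop over the ':'-split parts, carrying the 13 string accumulators
-- (represented as List Char; PySem string ops are defined over List Char).
def pvLoopA : List (List Char) → List Char → List Char → List Char → List Char →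
    List Char → List Char → List Char → List Char → List Char → List Char →
    List Char → List Char → List Char → List (String × String)
  | [], lh, lhm, rh, rhm, lf, lfm, rf, rfm, lhi, rhi, lfi, rfi, cd =>
      [("l", String.ofList lh), ("L", String.ofList lhm), ("r", String.ofList rh),
       ("R", String.ofList rhm), ("a", String.ofList lf), ("A", String.ofList lfm),
       ("b", String.ofList rf), ("B", String.ofList rfm), ("'L", String.ofList lhi),
       ("'R", String.ofList rhi), ("'A", String.ofList lfi), ("'B", String.ofList rfi),
       ("C", String.ofList cd)]
  | pt :: rest, lh, lhm, rh, rhm, lf, lfm, rf, rfm, lhi, rhi, lfi, rfi, cd =>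
      match pt with
      | [] => pvLoopA rest lh lhm rh rhm lf lfm rf rfm lhi rhi lfi rfi cd
      | c :: t =>
        if c = 'l' then pvLoopA rest (lh ++ t) lhm rh rhm lf lfm rf rfm lhi rhi lfi rfi cd
        else if c = 'L' then pvLoopA rest lh (lhm ++ t) rh rhm lf lfm rf rfm lhi rhi lfi rfi cd
        else if c = 'r' then pvLoopA rest lh lhm (rh ++ t) rhm lf lfm rf rfm lhi rhi lfi rfi cd
        else if c = 'R' then pvLoopA rest lh lhm rh (rhm ++ t) lf lfm rf rfm lhi rhi lfi rfi cd
        else if c = 'a' then pvLoopA rest lh lhm rh rhm (lf ++ t) lfm rf rfm lhi rhi lfi rfi cd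
        else if c = 'A' then pvLoopA rest lh lhm rh rhm lf (lfm ++ t) rf rfm lhi rhi lfi rfi cd
        else if c = 'b' then pvLoopA rest lh lhm rh rhm lf lfm (rf ++ t) rfm lhi rhi lfi rfi cd
        else if c = 'B' then pvLoopA rest lh lhm rh rhm lf lfm rf (rfm ++ t) lhi rhi lfi rfi cd
        else if c = 'C' then pvLoopA rest lh lhm rh rhm lf lfm rf rfm lhi rhi lfi rfi (cd ++ t)
        else if c = '\'' then
          match t with
          | [] => pvLoopA rest lh lhm rh rhm lf lfm rf rfm lhi rhi lfi rfi (cd ++ (c :: t))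
          | c2 :: t2 =>
            if c2 = 'L' then pvLoopA rest lh lhm rh rhm lf lfm rf rfm (lhi ++ t2) rhi lfi rfi cd
            else if c2 = 'R' then pvLoopA rest lh lhm rh rhm lf lfm rf rfm lhi (rhi ++ t2) lfi rfi cd
            else if c2 = 'A' then pvLoopA rest lh lhm rh rhm lf lfm rf rfm lhi rhi (lfi ++ t2) rfi cd
            else if c2 = 'B' then pvLoopA rest lh lhm rh rhm lf lfm rf rfm lhi rhi lfi (rfi ++ t2) cd
            else pvLoopA rest lh lhm rh rhm lf lfm rf rfm lhi rhi lfi rfi (cd ++ (c :: t))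
        else pvLoopA rest lh lhm rh rhm lf lfm rf rfm lhi rhi lfi rfi (cd ++ (c :: t))

def splitConceptString (s : String) : List (String × String) :=
  pvLoopA (PySem.Chars.splitOn s.toList [':']) [] [] [] [] [] [] [] [] [] [] [] [] []

-- ===== PORT B =====
-- B's classify helper: a non-empty part ↦ (category key, payload).
def pvClassify (pt : List Char) : String × List Char :=
  match pt with
  | [] => ("C", [])
  | c :: t =>
    if c ∈ ['l', 'L', 'r', 'R', 'a', 'A', 'b', 'B', 'C'] then (String.ofList [c], t)
    else if c = '\'' then
      match t with
      | c2 :: t2 =>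
        if c2 ∈ ['L', 'R', 'A', 'B'] then (String.ofList [c, c2], t2) else ("C", c :: t)
      | [] => ("C", c :: t)
    else ("C", c :: t)

def pvKeys : List String := ["l", "L", "r", "R", "a", "A", "b", "B", "'L", "'R", "'A", "'B", "C"]

def splitConceptString_alt (s : String) : List (String × String) :=
  let tagged := ((PySem.Chars.splitOn s.toList [':']).filter (fun pt => pt ≠ [])).map pvClassify
  pvKeys.map (fun k =>
    (k, String.ofList (PySem.Chars.join [] ((tagged.filter (fun p => p.1 == k)).map (fun p => p.2)))))

-- ===== PRECONDITION & SPEC =====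
def Spec_splitConceptString (s : String) (out : List (String × String)) : Prop := out = splitConceptString_alt s
instance (s : String) (out : List (String × String)) : Decidable (Spec_splitConceptString s out) := by unfold Spec_splitConceptString; infer_instance

-- ===== CLAIM (what is proved, stated in full; the proofs are below) =====
def Claim_equal_splitConceptString : Prop := ∀ (s : String), Dom_splitConceptString s → Spec_splitConceptString s (splitConceptString s)

-- ===== LEMMAS AND PROOFS =====

-- joined payload that B contributes to key k from a part list
def pvContrib (k : String) (parts : List (List Char)) : List Char :=
  (((((parts.filter (fun pt => pt ≠ [])).map pvClassify).filter (fun p => p.1 == k)).map (fun p => p.2))).flatten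

theorem pvJoin_nil_eq_flatten (xs : List (List Char)) :
    PySem.Chars.join [] xs = xs.flatten := by
  induction xs with
  | nil => simp [PySem.Chars.join, List.intercalate]
  | cons x xs ih =>
    cases xs with
    | nil => simp [PySem.Chars.join, List.intercalate]
    | cons y ys =>
      simp only [PySem.Chars.join, List.intercalate, List.intersperse] at *
      simp_all

theorem pvContrib_nil (k : String) : pvContrib k [] = [] := by simp [pvContrib]

theorem pvContrib_cons_empty (k : String) (rest : List (List Char)) :
    pvContrib k ([] :: rest) = pvContrib k rest := by simp [pvContrib]

theorem pvContrib_cons (k : String) (pt : List Char) (h : pt ≠ []) (rest : List (List Char)) :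
    pvContrib k (pt :: rest) =
      (if (pvClassify pt).1 == k then (pvClassify pt).2 else []) ++ pvContrib k rest := by
  by_cases hk : ((pvClassify pt).1 == k) = true
  · simp [pvContrib, h, hk]
  · simp [pvContrib, h, hk]

theorem pvLoopA_eq (parts : List (List Char)) :
    ∀ lh lhm rh rhm lf lfm rf rfm lhi rhi lfi rfi cd,
    pvLoopA parts lh lhm rh rhm lf lfm rf rfm lhi rhi lfi rfi cd =
      [("l", String.ofList (lh ++ pvContrib "l" parts)),
       ("L", String.ofList (lhm ++ pvContrib "L" parts)),
       ("r", String.ofList (rh ++ pvContrib "r" parts)),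
       ("R", String.ofList (rhm ++ pvContrib "R" parts)),
       ("a", String.ofList (lf ++ pvContrib "a" parts)),
       ("A", String.ofList (lfm ++ pvContrib "A" parts)),
       ("b", String.ofList (rf ++ pvContrib "b" parts)),
       ("B", String.ofList (rfm ++ pvContrib "B" parts)),
       ("'L", String.ofList (lhi ++ pvContrib "'L" parts)),
       ("'R", String.ofList (rhi ++ pvContrib "'R" parts)),
       ("'A", String.ofList (lfi ++ pvContrib "'A" parts)),
       ("'B", String.ofList (rfi ++ pvContrib "'B" parts)),
       ("C", String.ofList (cd ++ pvContrib "C" parts))] := by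
  induction parts with
  | nil => intro lh lhm rh rhm lf lfm rf rfm lhi rhi lfi rfi cd; simp [pvLoopA, pvContrib_nil]
  | cons pt rest ih =>
    intro lh lhm rh rhm lf lfm rf rfm lhi rhi lfi rfi cd
    cases pt with
    | nil => simp only [pvLoopA, ih, pvContrib_cons_empty]
    | cons c t =>
      have hne : (c :: t) ≠ ([] : List Char) := by simp
      by_cases h1 : c = 'l'
      · subst h1; simp [pvLoopA, ih, pvContrib_cons _ _ hne, pvClassify]
      · by_cases h2 : c = 'L'
        · subst h2; simp [pvLoopA, ih, pvContrib_cons _ _ hne, pvClassify]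
        · by_cases h3 : c = 'r'
          · subst h3; simp [pvLoopA, ih, pvContrib_cons _ _ hne, pvClassify]
          · by_cases h4 : c = 'R'
            · subst h4; simp [pvLoopA, ih, pvContrib_cons _ _ hne, pvClassify]
            · by_cases h5 : c = 'a'
              · subst h5; simp [pvLoopA, ih, pvContrib_cons _ _ hne, pvClassify]
              · by_cases h6 : c = 'A'
                · subst h6; simp [pvLoopA, ih, pvContrib_cons _ _ hne, pvClassify]
                · by_cases h7 : c = 'b'
                  · subst h7; simp [pvLoopA, ih, pvContrib_cons _ _ hne, pvClassify]
                  · by_cases h8 : c = 'B'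
                    · subst h8; simp [pvLoopA, ih, pvContrib_cons _ _ hne, pvClassify]
                    · by_cases h9 : c = 'C'
                      · subst h9; simp [pvLoopA, ih, pvContrib_cons _ _ hne, pvClassify]
                      · by_cases h10 : c = '\''
                        · subst h10
                          cases t with
                          | nil =>
                            simp [pvLoopA, ih, pvContrib_cons _ _ hne, pvClassify]
                          | cons c2 t2 =>
                            by_cases g1 : c2 = 'L'
                            · subst g1; simp [pvLoopA, ih, pvContrib_cons _ _ hne, pvClassify]
                            · by_cases g2 : c2 = 'R'
                              · subst g2; simp [pvLoopA, ih, pvContrib_cons _ _ hne, pvClassify]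
                              · by_cases g3 : c2 = 'A'
                                · subst g3; simp [pvLoopA, ih, pvContrib_cons _ _ hne, pvClassify]
                                · by_cases g4 : c2 = 'B'
                                  · subst g4; simp [pvLoopA, ih, pvContrib_cons _ _ hne, pvClassify]
                                  · simp [pvLoopA, ih, pvContrib_cons _ _ hne, pvClassify,
                                      h1, h2, h3, h4, h5, h6, h7, h8, h9, g1, g2, g3, g4]
                        · simp [pvLoopA, ih, pvContrib_cons _ _ hne, pvClassify,
                            h1, h2, h3, h4, h5, h6, h7, h8, h9, h10]

-- ===== VERDICT (by name: the statement is the Claim_ definition above) =====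
theorem splitConceptString_spec : Claim_equal_splitConceptString := by
  intro s _
  unfold Spec_splitConceptString splitConceptString splitConceptString_alt
  rw [pvLoopA_eq]
  simp [pvKeys, pvJoin_nil_eq_flatten, pvContrib]
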